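-- pv_equiv track=rewrite | github.com/ImDenisul/AoC-2023 | Days/Restul/Day12_p1.py | verificare
-- ===== SOURCE A (Python) =====
-- def verificare(linii, valori):
--     nr=0
--     al_catlea=0
--     j=0
--     hastaguri=[]
--     while(j < len(linii)):
--         if linii[j] == '#':
--             nr+=1
--         else:
--             if nr != 0:
--                 hastaguri.append(nr)
--                 nr=0
--         j+=1
--     if nr != 0:
--         hastaguri.append(nr)
--
--     if hastaguri == valori:
--         return True
--     else:
--         return False
-- ===== SOURCE B (Python) =====
-- def verificare(linii, valori):
--     masked = ''.join(c if c == '#' else ' ' for c in linii)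
--     return [len(word) for word in masked.split()] == valori
-- ===== Notes on version B (the rewrite author's own statement) =====
-- stated objective: idiomatic
-- what changed: Replaces the manual index loop with a running counter and appends by masking every non-'#' char to a space, splitting on whitespace to get the maximal '#' runs, and comparing their lengths to valori in one expression.
import Mathlib
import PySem

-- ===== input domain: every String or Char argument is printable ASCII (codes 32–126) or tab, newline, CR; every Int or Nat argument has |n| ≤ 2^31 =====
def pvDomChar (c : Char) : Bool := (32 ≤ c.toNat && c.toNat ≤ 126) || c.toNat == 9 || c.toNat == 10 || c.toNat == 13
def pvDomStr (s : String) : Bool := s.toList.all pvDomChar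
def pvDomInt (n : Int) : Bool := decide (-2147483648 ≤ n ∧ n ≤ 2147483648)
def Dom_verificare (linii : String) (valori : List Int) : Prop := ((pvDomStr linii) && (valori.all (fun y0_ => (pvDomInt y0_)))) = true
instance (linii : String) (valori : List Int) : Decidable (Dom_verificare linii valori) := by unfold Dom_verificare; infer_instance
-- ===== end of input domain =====

-- B masks every non-'#' char to a space and splits on whitespace, comparing the run lengths
-- to valori in one expression instead of A's index loop with a running counter (idiomatic).


-- ===== PORT A =====
-- while over the characters with a running counter nr and an accumulator hastaguri
def verificare (linii : String) (valori : List Int) : Bool :=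
  let r := linii.toList.foldl
    (fun (st : List Int × Int) c =>
      if c = '#' then (st.1, st.2 + 1)
      else if st.2 ≠ 0 then (st.1 ++ [st.2], 0) else (st.1, st.2))
    ([], 0)
  let hastaguri := if r.2 ≠ 0 then r.1 ++ [r.2] else r.1
  hastaguri == valori

-- ===== PORT B =====
def verificare_alt (linii : String) (valori : List Int) : Bool :=
  let masked := String.ofList (linii.toList.map (fun c => if c = '#' then c else ' '))
  (PySem.Str.split₀ masked).map PySem.Str.len == valori

-- ===== PRECONDITION & SPEC =====
def Spec_verificare (linii : String) (valori : List Int) (out : Bool) : Prop := out = verificare_alt linii valori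
instance (linii : String) (valori : List Int) (out : Bool) : Decidable (Spec_verificare linii valori out) := by unfold Spec_verificare; infer_instance

-- ===== CLAIM (what is proved, stated in full; the proofs are below) =====
def Claim_equal_verificare : Prop := ∀ (linii : String) (valori : List Int), Dom_verificare linii valori → Spec_verificare linii valori (verificare linii valori)

-- ===== LEMMAS AND PROOFS =====

-- the list of lengths of the maximal '#' runs, given a pending run of length n
def pvRuns : Int → List Char → List Int
  | n, [] => if n = 0 then [] else [n]
  | n, c :: cs => if c = '#' then pvRuns (n + 1) cs else if n = 0 then pvRuns 0 cs else n :: pvRuns 0 cs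

theorem pvA_loop (cs : List Char) : ∀ (acc : List Int) (n : Int),
    (let r := cs.foldl
        (fun (st : List Int × Int) c =>
          if c = '#' then (st.1, st.2 + 1)
          else if st.2 ≠ 0 then (st.1 ++ [st.2], 0) else (st.1, st.2))
        (acc, n)
      if r.2 ≠ 0 then r.1 ++ [r.2] else r.1) = acc ++ pvRuns n cs := by
  induction cs with
  | nil =>
    intro acc n
    simp only [List.foldl_nil, pvRuns]
    by_cases h : n = 0
    · rw [if_neg (not_not_intro h), if_pos h, List.append_nil]
    · rw [if_pos h, if_neg h]
  | cons c cs ih =>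
    intro acc n
    simp only [List.foldl_cons]
    by_cases hc : c = '#'
    · rw [if_pos hc]
      rw [ih acc (n + 1)]
      simp only [pvRuns, if_pos hc]
    · rw [if_neg hc]
      by_cases hn : n = 0
      · rw [if_neg (not_not_intro hn), ih acc n, hn]
        simp [pvRuns, hc]
      · rw [if_pos hn, ih (acc ++ [n]) 0]
        simp only [pvRuns, if_neg hc, if_neg hn, List.append_assoc, List.singleton_append]

theorem pvB_go (cs : List Char) : ∀ (cur : List Char) (acc : List (List Char)),
    (PySem.Chars.split₀.go (cs.map (fun c => if c = '#' then c else ' ')) cur acc).map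
        (fun w => (w.length : Int))
      = acc.reverse.map (fun w => (w.length : Int)) ++ pvRuns (cur.length : Int) cs := by
  induction cs with
  | nil =>
    intro cur acc
    cases cur with
    | nil => simp [PySem.Chars.split₀.go, pvRuns]
    | cons x xs =>
      simp [PySem.Chars.split₀.go, pvRuns]
      omega
  | cons c cs ih =>
    intro cur acc
    by_cases hc : c = '#'
    · have hm : (if c = '#' then c else ' ') = '#' := by rw [if_pos hc, hc]
      simp only [List.map_cons, hm, PySem.Chars.split₀.go]
      rw [if_neg (by decide : ¬ (PySem.Chars.isspace '#' = true))]
      have h := ih ('#' :: cur) acc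
      simp only [List.length_cons] at h
      rw [h]
      simp only [pvRuns, if_pos hc]
      norm_num
    · have hm : (if c = '#' then c else ' ') = ' ' := if_neg hc
      simp only [List.map_cons, hm, PySem.Chars.split₀.go]
      rw [if_pos (by decide : PySem.Chars.isspace ' ' = true)]
      cases cur with
      | nil =>
        rw [if_pos (by decide : ([] : List Char).isEmpty = true)]
        have h := ih [] acc
        simp only [List.length_nil, Nat.cast_zero] at h
        rw [h]
        simp [pvRuns, hc]
      | cons x xs =>
        rw [if_neg (by simp : ¬ ((x :: xs).isEmpty = true))]
        have h := ih [] ((x :: xs).reverse :: acc)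
        simp only [List.length_nil, Nat.cast_zero] at h
        rw [h]
        simp only [pvRuns, if_neg hc, List.length_cons]
        have hne : ((xs.length + 1 : Nat) : Int) ≠ 0 := by positivity
        rw [if_neg hne]
        simp [List.length_append]

theorem pvEqRuns (linii : String) (valori : List Int) :
    verificare linii valori = verificare_alt linii valori := by
  unfold verificare verificare_alt
  have hA := pvA_loop linii.toList [] 0
  simp only [List.nil_append] at hA
  have hB := pvB_go linii.toList [] []
  simp only [List.reverse_nil, List.map_nil, List.nil_append, List.length_nil,
    Nat.cast_zero] at hB
  simp only [PySem.Str.split₀, PySem.Chars.split₀, String.toList_ofList, List.map_map,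
    Function.comp_def, PySem.Str.len, String.toList_ofList]
  rw [hA, hB]

-- ===== VERDICT (by name: the statement is the Claim_ definition above) =====
theorem verificare_spec : Claim_equal_verificare := by
  intro linii valori _
  unfold Spec_verificare
  exact pvEqRuns linii valori
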